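-- pv_equiv track=rewrite | github.com/yuvika022/100DaysOfCode-2025 | DSA/SakshamDwivedi_590013147/Day20/D20P3.py | ranked_largest
-- ===== SOURCE A (Python) =====
-- def ranked_largest(arr, k):
--     for i in range(len(arr)):
--         kt = 1
--         for j in range(len(arr)):
--             if arr[i] < arr[j]:
--                 kt += 1
--         if kt == k:
--             return arr[i]
--     return None
-- ===== SOURCE B (Python) =====
-- def ranked_largest(arr, k):
--     s = sorted(arr, reverse=True)
--     rank = {}
--     for idx, v in enumerate(s):
--         if v not in rank:
--             rank[v] = idx + 1
--     for x in arr: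
--         if rank[x] == k:
--             return x
--     return None
-- ===== Notes on version B (the rewrite author's own statement) =====
-- stated objective: faster
-- what changed: Replaces the per-element inner counting scan by one descending sort plus a first-occurrence-index rank dictionary built in a single pass, then a linear scan of the original order.
import Mathlib
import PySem

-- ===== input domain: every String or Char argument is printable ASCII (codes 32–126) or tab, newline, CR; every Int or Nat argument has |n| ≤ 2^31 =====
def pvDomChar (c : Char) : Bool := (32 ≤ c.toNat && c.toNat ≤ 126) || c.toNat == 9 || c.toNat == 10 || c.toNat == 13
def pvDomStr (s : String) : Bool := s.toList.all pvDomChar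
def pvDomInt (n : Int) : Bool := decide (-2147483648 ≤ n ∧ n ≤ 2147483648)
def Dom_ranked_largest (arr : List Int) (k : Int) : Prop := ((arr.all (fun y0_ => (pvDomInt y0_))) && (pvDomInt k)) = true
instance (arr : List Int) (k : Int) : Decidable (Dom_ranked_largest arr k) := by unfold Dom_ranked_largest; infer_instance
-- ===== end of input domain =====

-- B replaces A's quadratic per-element counting scan by one descending sort plus a
-- first-occurrence-index rank dictionary, then a linear scan in original order (faster: asymptotic).

-- ===== PORT A =====
-- outer loop over arr[i] in order; inner loop counts kt = 1 + #{j | arr[i] < arr[j]}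
def rlA_loop (arr : List Int) (k : Int) : List Int → Option Int
  | [] => none
  | x :: rest =>
    let kt := arr.foldl (fun kt aj => if x < aj then kt + 1 else kt) (1 : Int)
    if kt = k then some x else rlA_loop arr k rest

def ranked_largest (arr : List Int) (k : Int) : Option Int :=
  rlA_loop arr k arr

-- ===== PORT B =====
-- the enumerate loop: for idx, v in enumerate(s): if v not in rank: rank[v] = idx + 1
def rlB_build : List Int → Int → PySem.Dict Int Int → PySem.Dict Int Int
  | [], _, d => d
  | v :: rest, i, d =>
      rlB_build rest (i + 1) (if d.contains v then d else d.insert v (i + 1))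

-- rank[x] never raises here since every x of arr is a key of rank; getD is exact on that domain
def rlB_scan (d : PySem.Dict Int Int) (k : Int) : List Int → Option Int
  | [] => none
  | x :: rest => if d.getD x 0 = k then some x else rlB_scan d k rest

def ranked_largest_alt (arr : List Int) (k : Int) : Option Int :=
  let s := PySem.List.sorted arr (fun x => x) true
  let rank := rlB_build s 0 PySem.Dict.empty
  rlB_scan rank k arr

-- ===== PRECONDITION & SPEC =====
def Spec_ranked_largest (arr : List Int) (k : Int) (out : Option Int) : Prop := out = ranked_largest_alt arr k
instance (arr : List Int) (k : Int) (out : Option Int) : Decidable (Spec_ranked_largest arr k out) := by unfold Spec_ranked_largest; infer_instance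

-- ===== CLAIM (what is proved, stated in full; the proofs are below) =====
def Claim_equal_ranked_largest : Prop := ∀ (arr : List Int) (k : Int), Dom_ranked_largest arr k → Spec_ranked_largest arr k (ranked_largest arr k)

-- ===== LEMMAS AND PROOFS =====

-- A's inner counting loop is 1 + countP
theorem rlA_count (x : Int) (arr : List Int) (c : Int) :
    arr.foldl (fun kt aj => if x < aj then kt + 1 else kt) c
      = c + arr.countP (fun a => decide (x < a)) := by
  induction arr generalizing c with
  | nil => simp
  | cons a t ih =>
      simp only [List.foldl_cons, List.countP_cons, ih]
      by_cases h : x < a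
      · simp [h]; ring
      · simp [h]

-- keys already present are never overwritten
theorem rlB_build_get?_some (s : List Int) (i : Int) (d : PySem.Dict Int Int)
    (x : Int) (r : Int) (h : d.get? x = some r) :
    (rlB_build s i d).get? x = some r := by
  induction s generalizing i d with
  | nil => simpa [rlB_build]
  | cons v t ih =>
      simp only [rlB_build]
      by_cases hc : d.contains v
      · simpa [hc] using ih _ _ h
      · simp only [hc, Bool.false_eq_true, if_false]
        apply ih
        by_cases hxv : x = v
        · subst hxv
          rw [PySem.Dict.contains_eq_isSome_get?] at hc
          simp [h] at hc
        · rw [PySem.Dict.get?_insert_of_ne _ _ hxv, h]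

-- an absent key in s gets the (offset) index of its FIRST occurrence, plus 1
theorem rlB_build_get?_none (s : List Int) (i : Int) (d : PySem.Dict Int Int)
    (x : Int) (hd : d.get? x = none) (hx : x ∈ s) :
    (rlB_build s i d).get? x = some (i + (s.idxOf x : Int) + 1) := by
  induction s generalizing i d with
  | nil => cases hx
  | cons v t ih =>
      by_cases hxv : x = v
      · subst hxv
        have hc : d.contains x = false := by
          rw [PySem.Dict.contains_eq_isSome_get?, hd]; rfl
        simp only [rlB_build, hc, if_false, Bool.false_eq_true]
        have := rlB_build_get?_some t (i + 1) (d.insert x (i + 1)) x (i + 1)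
          (PySem.Dict.get?_insert_self _ _ _)
        rw [this, List.idxOf_cons_self]
        norm_num
      · have hxt : x ∈ t := by
          cases hx with
          | head => exact absurd rfl hxv
          | tail _ h => exact h
        simp only [rlB_build]
        have hd' : ∀ d' : PySem.Dict Int Int,
            d' = (if d.contains v then d else d.insert v (i + 1)) → d'.get? x = none := by
          intro d' hdef
          by_cases hc : d.contains v <;> simp [hc] at hdef <;> subst hdef
          · exact hd
          · rw [PySem.Dict.get?_insert_of_ne _ _ hxv]; exact hd
        rw [ih (i + 1) _ (hd' _ rfl) hxt, List.idxOf_cons_ne t (fun a => hxv a.symm)]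
        push_cast
        ring_nf

-- in a descending-sorted list the index of the first occurrence of x counts the elements > x
theorem idxOf_sorted_desc (s : List Int) (hs : s.Pairwise (fun a b => b ≤ a))
    (x : Int) (hx : x ∈ s) :
    (s.idxOf x : Int) = s.countP (fun a => decide (x < a)) := by
  induction s with
  | nil => cases hx
  | cons v t ih =>
      rcases List.pairwise_cons.mp hs with ⟨hv, ht⟩
      by_cases hxv : x = v
      · subst hxv
        have h0 : t.countP (fun a => decide (x < a)) = 0 := by
          rw [List.countP_eq_zero]
          intro a ha
          simpa using not_lt.mpr (hv a ha)
        simp [List.idxOf_cons_self, h0]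
      · have hxt : x ∈ t := by
          cases hx with
          | head => exact absurd rfl hxv
          | tail _ h => exact h
        have hlt : x < v := lt_of_le_of_ne (hv x hxt) hxv
        rw [List.idxOf_cons_ne t (fun a => hxv a.symm), List.countP_cons]
        simp only [hlt, decide_true, if_pos trivial]
        push_cast [← ih ht hxt]
        ring

-- the rank dictionary value at any element of arr equals A's kt there
theorem rank_eq_kt (arr : List Int) (x : Int) (hx : x ∈ arr) :
    (rlB_build (PySem.List.sorted arr (fun x => x) true) 0 PySem.Dict.empty).getD x 0
      = arr.foldl (fun kt aj => if x < aj then kt + 1 else kt) (1 : Int) := by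
  set s := PySem.List.sorted arr (fun x => x) true with hsdef
  have hperm : s.Perm arr := PySem.List.sorted_perm arr (fun x => x) true
  have hxs : x ∈ s := hperm.mem_iff.mpr hx
  have hpw : s.Pairwise (fun a b => b ≤ a) := by
    simpa using PySem.List.sorted_pairwise_rev arr (fun x => x)
  have hget := rlB_build_get?_none s 0 PySem.Dict.empty x
    (PySem.Dict.get?_empty _) hxs
  rw [PySem.Dict.getD_eq_get?_getD, hget]
  simp only [Option.getD_some]
  rw [rlA_count, idxOf_sorted_desc s hpw x hxs, hperm.countP_eq]
  ring

-- the two scans agree as long as every scanned element lies in arr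
theorem scan_eq (arr : List Int) (k : Int) (l : List Int) (hl : ∀ x ∈ l, x ∈ arr) :
    rlA_loop arr k l
      = rlB_scan (rlB_build (PySem.List.sorted arr (fun x => x) true) 0 PySem.Dict.empty) k l := by
  induction l with
  | nil => rfl
  | cons x t ih =>
      have hx : x ∈ arr := hl x (List.mem_cons_self)
      simp only [rlA_loop, rlB_scan, rank_eq_kt arr x hx]
      split
      · rfl
      · exact ih (fun y hy => hl y (List.mem_cons_of_mem _ hy))

-- ===== VERDICT (by name: the statement is the Claim_ definition above) =====
theorem ranked_largest_spec : Claim_equal_ranked_largest := by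
  intro arr k _
  unfold Spec_ranked_largest ranked_largest ranked_largest_alt
  exact scan_eq arr k arr (fun _ h => h)
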